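-- pv_equiv track=rewrite | github.com/sasanparsa/AddFringeToCarpet | controller/core.py | GetPlainEdges
-- ===== SOURCE A (Python) =====
-- def GetPlainEdges(edges):
--     plain_edges_left = [[0 for j in range(0, len(edges[0]))] for i in range(0, len(edges))]
--     plain_edges_right = [[0 for j in range(0, len(edges[0]))] for i in range(0, len(edges))]
--     plain_edges_top = [[0 for j in range(0, len(edges[0]))] for i in range(0, len(edges))]
--     plain_edges_bottom = [[0 for j in range(0, len(edges[0]))] for i in range(0, len(edges))]
--     for i in range(0, len(edges[0])):
--         for j in range(0, len(edges)):
--             if (edges[j][i] == 255):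
--                 break
--             else:
--                 plain_edges_top[j][i] = 255
--         for j in range(0, len(edges)):
--             if (edges[len(edges) - j - 1][i] == 255):
--                 break
--             else:
--                 plain_edges_bottom[len(edges) - j - 1][i] = 255
--
--     for i in range(0, len(edges)):
--         for j in range(0, len(edges[0])):
--             if (edges[i][j] == 255):
--                 break
--             else:
--                 plain_edges_left[i][j] = 255
--         for j in range(0, len(edges[0])):
--             if (edges[i][len(edges[0]) - j - 1] == 255):
--                 break
--             else:
--                 plain_edges_right[i][len(edges[0]) - j - 1] = 255
--
--     # ShowImage(plain_edges_bottom,False,'gray')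
--     # ShowImage(plain_edges_top, False, 'gray')
--     # ShowImage(plain_edges_left, False, 'gray')
--     # ShowImage(plain_edges_right, False, 'gray')
--
--     plain_edges = plain_edges_bottom
--     for i in range(len(edges)):
--         for j in range(len(edges[0])):
--             if (255 in [plain_edges_bottom[i][j], plain_edges_top[i][j], plain_edges_left[i][j],plain_edges_right[i][j]]):
--                 plain_edges[i][j] = 255
--
--     return plain_edges
-- ===== SOURCE B (Python) =====
-- def GetPlainEdges(edges):
--     h, w = len(edges), len(edges[0])
--     firstL = [next((j for j in range(w) if edges[i][j] == 255), w) for i in range(h)]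
--     lastR = [next((j for j in range(w - 1, -1, -1) if edges[i][j] == 255), -1) for i in range(h)]
--     firstT = [next((i for i in range(h) if edges[i][j] == 255), h) for j in range(w)]
--     lastB = [next((i for i in range(h - 1, -1, -1) if edges[i][j] == 255), -1) for j in range(w)]
--     return [[255 if (j < firstL[i] or j > lastR[i] or i < firstT[j] or i > lastB[j]) else 0
--              for j in range(w)]
--             for i in range(h)]
-- ===== Notes on version B (the rewrite author's own statement) =====
-- stated objective: simpler
-- what changed: Replaces A's four full h*w mark matrices built by break-scans plus a merge pass with four per-line boundary index tables (first/last 255 per row and per column) and a single comprehension that emits 255 iff the cell lies outside those boundaries.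
import Mathlib
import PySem

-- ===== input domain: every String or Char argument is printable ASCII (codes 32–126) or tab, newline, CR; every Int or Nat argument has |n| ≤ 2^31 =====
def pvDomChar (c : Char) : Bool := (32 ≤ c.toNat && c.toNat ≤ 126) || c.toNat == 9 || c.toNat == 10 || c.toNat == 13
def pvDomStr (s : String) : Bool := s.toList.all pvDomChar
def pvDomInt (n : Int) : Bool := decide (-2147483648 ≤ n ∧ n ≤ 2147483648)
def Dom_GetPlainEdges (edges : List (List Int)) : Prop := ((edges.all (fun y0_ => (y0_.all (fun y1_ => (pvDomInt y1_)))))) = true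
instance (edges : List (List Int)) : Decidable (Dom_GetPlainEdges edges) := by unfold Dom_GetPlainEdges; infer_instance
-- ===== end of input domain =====

-- B replaces A's four full h×w mark matrices (built by break-scans) and merge pass with four
-- per-line boundary index tables and one comparison pass; objective: simpler (same O(h·w) cost).

-- ===== PORT A =====
-- pvCell m i j = Python's m[i][j] for the in-range nonnegative indices A uses (Pre_ excludes the
-- out-of-range reads on which Python raises); pvSet is in-place assignment m[i][j] = v.
def pvCell (m : List (List Int)) (i j : Nat) : Int := (m.getD i []).getD j 0

def pvSet (m : List (List Int)) (i j : Nat) (v : Int) : List (List Int) :=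
  m.set i ((m.getD i []).set j v)

-- the inner 'for j in range(h): if edges[j][i] == 255: break else: acc[j][i] = 255' loops
-- (js carries the exact index sequence Python iterates, forward or reversed)
def pvColScan (edges : List (List Int)) (i : Nat) (js : List Nat) (acc : List (List Int)) :
    List (List Int) :=
  match js with
  | [] => acc
  | j :: rest =>
      if pvCell edges j i == 255 then acc else pvColScan edges i rest (pvSet acc j i 255)

-- the row-wise break loops: checks edges[i][j], sets acc[i][j]
def pvRowScan (edges : List (List Int)) (i : Nat) (js : List Nat) (acc : List (List Int)) :
    List (List Int) :=
  match js with
  | [] => acc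
  | j :: rest =>
      if pvCell edges i j == 255 then acc else pvRowScan edges i rest (pvSet acc i j 255)

-- 'plain_edges = plain_edges_bottom' aliases in Python; each merge cell is read before it is
-- written, so starting the merge fold from a copy of bottom is observationally identical.
def GetPlainEdges (edges : List (List Int)) : List (List Int) :=
  let h := edges.length
  let w := (edges.headD []).length
  let zeros := (List.range h).map (fun _ => (List.range w).map (fun _ => (0 : Int)))
  let tb := (List.range w).foldl
      (fun (p : List (List Int) × List (List Int)) i =>
        (pvColScan edges i (List.range h) p.1,
         pvColScan edges i ((List.range h).map (fun j => h - 1 - j)) p.2))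
      (zeros, zeros)
  let lr := (List.range h).foldl
      (fun (p : List (List Int) × List (List Int)) i =>
        (pvRowScan edges i (List.range w) p.1,
         pvRowScan edges i ((List.range w).map (fun j => w - 1 - j)) p.2))
      (zeros, zeros)
  (List.range h).foldl
    (fun acc i =>
      (List.range w).foldl
        (fun acc2 j =>
          if (255 : Int) ∈ [pvCell tb.2 i j, pvCell tb.1 i j, pvCell lr.1 i j, pvCell lr.2 i j]
          then pvSet acc2 i j 255 else acc2)
        acc)
    tb.2

-- ===== PORT B =====
def GetPlainEdges_alt (edges : List (List Int)) : List (List Int) :=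
  let h := edges.length
  let w := (edges.headD []).length
  let firstL := (List.range h).map
      (fun i => ((List.range w).find? (fun j => pvCell edges i j == 255)).getD w)
  let lastR := (List.range h).map
      (fun i =>
        match ((List.range w).map (fun j => w - 1 - j)).find?
            (fun j => pvCell edges i j == 255) with
        | some j => (j : Int)
        | none => -1)
  let firstT := (List.range w).map
      (fun j => ((List.range h).find? (fun i => pvCell edges i j == 255)).getD h)
  let lastB := (List.range w).map
      (fun j =>
        match ((List.range h).map (fun i => h - 1 - i)).find?
            (fun i => pvCell edges i j == 255) with
        | some i => (i : Int)
        | none => -1)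
  (List.range h).map (fun i =>
    (List.range w).map (fun j =>
      if j < firstL.getD i 0 ∨ (j : Int) > lastR.getD i (-1) ∨
         i < firstT.getD j 0 ∨ (i : Int) > lastB.getD j (-1)
      then (255 : Int) else 0))

-- ===== PRECONDITION & SPEC =====
-- Pre_ excludes exactly the inputs where Python A raises IndexError: the empty list
-- (len(edges[0])) and rows shorter than the first row (edges[i][...] scans up to len(edges[0])).
def Pre_GetPlainEdges (edges : List (List Int)) : Prop :=
  edges ≠ [] ∧ ∀ r ∈ edges, (edges.headD []).length ≤ r.length
instance (edges : List (List Int)) : Decidable (Pre_GetPlainEdges edges) := by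
  unfold Pre_GetPlainEdges; infer_instance
def pvWitness_GetPlainEdges : List (List Int) := [[0, 255], [0, 0]]

def Spec_GetPlainEdges (edges : List (List Int)) (out : List (List Int)) : Prop := out = GetPlainEdges_alt edges
instance (edges : List (List Int)) (out : List (List Int)) : Decidable (Spec_GetPlainEdges edges out) := by unfold Spec_GetPlainEdges; infer_instance

-- ===== CLAIM (what is proved, stated in full; the proofs are below) =====
def Claim_equal_GetPlainEdges : Prop := ∀ (edges : List (List Int)), Dom_GetPlainEdges edges → Pre_GetPlainEdges edges → Spec_GetPlainEdges edges (GetPlainEdges edges)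

-- ===== LEMMAS AND PROOFS =====

-- shape: h rows, each of length w
def pvShape (m : List (List Int)) (h w : Nat) : Prop :=
  m.length = h ∧ ∀ r ∈ m, r.length = w

theorem pvCell_set (m : List (List Int)) (h w i j a b : Nat) (v : Int)
    (hm : pvShape m h w) (hi : i < h) (hj : j < w) :
    pvCell (pvSet m i j v) a b = if a = i ∧ b = j then v else pvCell m a b := by
  obtain ⟨hl, hr⟩ := hm
  have him : i < m.length := by omega
  have hrow : (m[i]?.getD []).length = w := by
    rw [List.getElem?_eq_getElem him]
    exact hr _ (List.getElem_mem him)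
  unfold pvCell pvSet
  simp only [List.getD_eq_getElem?_getD, List.getElem?_set]
  by_cases h1 : a = i ∧ b = j
  · obtain ⟨ha', hb'⟩ := h1; subst ha'; subst hb'
    have hb : b < (m[a]?.getD []).length := by omega
    simp only [List.getElem?_eq_getElem him, Option.getD_some] at hb
    simp [him]
    rw [List.getElem?_set_self hb]
    rfl
  · rw [if_neg h1]
    by_cases h2 : i = a
    · subst h2
      have hjb : ¬ j = b := fun hb => h1 ⟨rfl, hb.symm⟩
      simp [him, hjb]
    · rw [if_neg h2]

theorem pvShape_set2 (m : List (List Int)) (h w i j : Nat) (v : Int)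
    (hm : pvShape m h w) : pvShape (pvSet m i j v) h w := by
  obtain ⟨hl, hr⟩ := hm
  by_cases hi : i < m.length
  · refine ⟨by simpa [pvSet] using hl, ?_⟩
    intro r hrmem
    rcases List.mem_or_eq_of_mem_set hrmem with h1 | h1
    · exact hr r h1
    · subst h1
      rw [List.length_set]
      exact hr _ (by rw [List.getD_eq_getElem _ _ hi]; exact List.getElem_mem hi)
  · have : pvSet m i j v = m := List.set_eq_of_length_le (by omega)
    rw [this]; exact ⟨hl, hr⟩

theorem pvTW_mem_range' (p : Nat → Bool) :
    ∀ (n s a : Nat),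
      a ∈ (List.range' s n).takeWhile (fun j => !p j) ↔
        (s ≤ a ∧ a < s + n ∧ ∀ k, s ≤ k → k ≤ a → p k = false) := by
  intro n
  induction n with
  | zero => intro s a; simp; omega
  | succ n ih =>
      intro s a
      rw [List.range'_succ, List.takeWhile_cons]
      by_cases hp : p s
      · simp only [hp, Bool.not_true]
        constructor
        · intro hx; simp at hx
        · rintro ⟨hsa, -, h3⟩
          exact absurd (h3 s le_rfl hsa) (by simp [hp])
      · simp only [Bool.not_eq_true] at hp
        simp only [hp, Bool.not_false, if_pos, List.mem_cons, ih]
        constructor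
        · rintro (heq | ⟨h1, h2, h3⟩)
          · refine ⟨by omega, by omega, fun k hk1 hk2 => ?_⟩
            have hk : k = s := by omega
            rw [hk]; exact hp
          · refine ⟨by omega, by omega, fun k hk1 hk2 => ?_⟩
            rcases Nat.eq_or_lt_of_le hk1 with heq2 | hlt
            · rw [← heq2]; exact hp
            · exact h3 k (by omega) hk2
        · rintro ⟨h1, h2, h3⟩
          rcases Nat.eq_or_lt_of_le h1 with rfl | hlt
          · exact Or.inl rfl
          · exact Or.inr ⟨by omega, by omega, fun k hk1 hk2 => h3 k (by omega) hk2⟩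

theorem pvFind_range'_lt (p : Nat → Bool) :
    ∀ (n s a : Nat), s ≤ a →
      (a < ((List.range' s n).find? p).getD (s + n) ↔
        (a < s + n ∧ ∀ k, s ≤ k → k ≤ a → p k = false)) := by
  intro n
  induction n with
  | zero => intro s a hsa; simp; omega
  | succ n ih =>
      intro s a hsa
      rw [List.range'_succ, List.find?_cons]
      by_cases hp : p s
      · simp only [hp, Option.getD_some]
        constructor
        · intro hx; omega
        · rintro ⟨-, h3⟩
          exact absurd (h3 s le_rfl hsa) (by simp [hp])
      · simp only [Bool.not_eq_true] at hp
        simp only [hp]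
        rcases Nat.eq_or_lt_of_le hsa with rfl | hlt
        · constructor
          · intro _
            refine ⟨by omega, fun k hk1 hk2 => ?_⟩
            have : k = s := by omega
            subst this; exact hp
          · intro _
            rcases hfind : (List.range' (s + 1) n).find? p with - | m
            · rw [Option.getD_none]; omega
            · have hm := List.mem_of_find?_eq_some hfind
              rw [List.mem_range'_1] at hm
              rw [Option.getD_some]; omega
        · have heq : s + (n + 1) = (s + 1) + n := by omega
          rw [heq, ih (s+1) a (by omega)]
          constructor
          · rintro ⟨h2, h3⟩
            exact ⟨by omega, fun k hk1 hk2 => by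
              rcases Nat.eq_or_lt_of_le hk1 with rfl | hlt2
              · exact hp
              · exact h3 k (by omega) hk2⟩
          · rintro ⟨h2, h3⟩
            exact ⟨by omega, fun k hk1 hk2 => h3 k (by omega) hk2⟩

theorem pvLrev_succ (n : Nat) :
    (List.range (n + 1)).map (fun j => n + 1 - 1 - j) =
      n :: (List.range n).map (fun j => n - 1 - j) := by
  rw [List.range_succ_eq_map]
  simp only [List.map_cons, List.map_map]
  congr 1
  apply List.map_congr_left
  intro j _
  simp only [Function.comp_apply]
  omega

theorem pvMem_Lrev (n x : Nat) (hx : x ∈ (List.range n).map (fun j => n - 1 - j)) : x < n := by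
  simp only [List.mem_map, List.mem_range] at hx
  obtain ⟨j, hj, rfl⟩ := hx
  omega

theorem pvTW_mem_rev (p : Nat → Bool) :
    ∀ (n a : Nat),
      a ∈ ((List.range n).map (fun j => n - 1 - j)).takeWhile (fun j => !p j) ↔
        (a < n ∧ ∀ k, a ≤ k → k < n → p k = false) := by
  intro n
  induction n with
  | zero => intro a; simp
  | succ n ih =>
      intro a
      rw [pvLrev_succ, List.takeWhile_cons]
      by_cases hp : p n
      · simp only [hp, Bool.not_true]
        constructor
        · intro hx; simp at hx
        · rintro ⟨h1, h3⟩
          exact absurd (h3 n (by omega) (by omega)) (by simp [hp])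
      · simp only [Bool.not_eq_true] at hp
        simp only [hp, Bool.not_false, if_pos, List.mem_cons, ih]
        constructor
        · rintro (heq | ⟨h1, h3⟩)
          · refine ⟨by omega, fun k hk1 hk2 => ?_⟩
            have hk : k = n := by omega
            rw [hk]; exact hp
          · refine ⟨by omega, fun k hk1 hk2 => ?_⟩
            by_cases hkn : k = n
            · rw [hkn]; exact hp
            · exact h3 k hk1 (by omega)
        · rintro ⟨h1, h3⟩
          by_cases han : a = n
          · exact Or.inl han
          · exact Or.inr ⟨by omega, fun k hk1 hk2 => h3 k hk1 (by omega)⟩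

theorem pvFind_rev_gt (p : Nat → Bool) :
    ∀ (n a : Nat), a < n →
      (((match ((List.range n).map (fun j => n - 1 - j)).find? p with
          | some m => (m : Int) | none => -1) < (a : Int)) ↔
        (∀ k, a ≤ k → k < n → p k = false)) := by
  intro n
  induction n with
  | zero => intro a ha; omega
  | succ n ih =>
      intro a ha
      rw [pvLrev_succ, List.find?_cons]
      by_cases hp : p n
      · simp only [hp]
        constructor
        · intro hx
          exfalso
          have : (n : Int) < a := by simpa using hx
          omega
        · intro h3
          exact absurd (h3 n (by omega) (by omega)) (by simp [hp])
      · simp only [Bool.not_eq_true] at hp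
        simp only [hp]
        by_cases han : a = n
        · constructor
          · intro _ k hk1 hk2
            have hk : k = n := by omega
            rw [hk]; exact hp
          · intro _
            rcases hfind : ((List.range n).map (fun j => n - 1 - j)).find? p with - | m
            · show (-1 : Int) < (a : Int)
              omega
            · have hm := pvMem_Lrev n m (List.mem_of_find?_eq_some hfind)
              show (m : Int) < (a : Int)
              omega
        · have ha2 : a < n := by omega
          rw [ih a ha2]
          constructor
          · intro h3 k hk1 hk2
            by_cases hkn : k = n
            · rw [hkn]; exact hp
            · exact h3 k hk1 (by omega)
          · intro h3 k hk1 hk2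
            exact h3 k hk1 (by omega)

theorem pvShape_foldl {α : Type} (h w : Nat) (f : List (List Int) → α → List (List Int))
    (hf : ∀ m x, pvShape m h w → pvShape (f m x) h w) :
    ∀ (L : List α) (m : List (List Int)), pvShape m h w → pvShape (L.foldl f m) h w := by
  intro L
  induction L with
  | nil => intro m hm; exact hm
  | cons x L ih => intro m hm; exact ih _ (hf m x hm)

theorem pvCell_colFold (h w i : Nat) (hi : i < w) (J : List Nat) (hJ : ∀ j ∈ J, j < h)
    (a b : Nat) :
    ∀ (acc : List (List Int)), pvShape acc h w →
      pvCell (J.foldl (fun m j => pvSet m j i 255) acc) a b =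
        if b = i ∧ a ∈ J then 255 else pvCell acc a b := by
  induction J with
  | nil => intro acc _; simp
  | cons j J ih =>
      intro acc hacc
      rw [List.foldl_cons, ih (fun x hx => hJ x (List.mem_cons_of_mem _ hx)) _
        (pvShape_set2 _ h w _ _ _ hacc)]
      rw [pvCell_set acc h w j i a b 255 hacc (hJ j List.mem_cons_self) hi]
      by_cases h1 : b = i <;> by_cases h2 : a ∈ J <;> by_cases h3 : a = j <;>
        simp_all

theorem pvCell_rowFold (h w i : Nat) (hi : i < h) (J : List Nat) (hJ : ∀ j ∈ J, j < w)
    (a b : Nat) :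
    ∀ (acc : List (List Int)), pvShape acc h w →
      pvCell (J.foldl (fun m j => pvSet m i j 255) acc) a b =
        if a = i ∧ b ∈ J then 255 else pvCell acc a b := by
  induction J with
  | nil => intro acc _; simp
  | cons j J ih =>
      intro acc hacc
      rw [List.foldl_cons, ih (fun x hx => hJ x (List.mem_cons_of_mem _ hx)) _
        (pvShape_set2 _ h w _ _ _ hacc)]
      rw [pvCell_set acc h w i j a b 255 hacc hi (hJ j List.mem_cons_self)]
      by_cases h1 : a = i <;> by_cases h2 : b ∈ J <;> by_cases h3 : b = j <;>
        simp_all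

theorem pvCell_colOuter (h w : Nat) (Jf : Nat → List Nat) (hJ : ∀ i, ∀ j ∈ Jf i, j < h)
    (a b : Nat) (_hb : b < w) (I : List Nat) (hI : ∀ i ∈ I, i < w) :
    ∀ (acc : List (List Int)), pvShape acc h w →
      pvCell (I.foldl (fun m i => (Jf i).foldl (fun m' j => pvSet m' j i 255) m) acc) a b =
        if b ∈ I ∧ a ∈ Jf b then 255 else pvCell acc a b := by
  induction I with
  | nil => intro acc _; simp
  | cons i I ih =>
      intro acc hacc
      have hsh : pvShape ((Jf i).foldl (fun m' j => pvSet m' j i 255) acc) h w :=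
        pvShape_foldl h w _ (fun m x hm => pvShape_set2 _ h w _ _ _ hm) _ _ hacc
      rw [List.foldl_cons, ih (fun x hx => hI x (List.mem_cons_of_mem _ hx)) _ hsh]
      rw [pvCell_colFold h w i (hI i List.mem_cons_self) (Jf i) (hJ i) a b acc hacc]
      by_cases h1 : b ∈ I <;> by_cases h2 : b = i <;> by_cases h3 : a ∈ Jf b <;>
        simp_all

theorem pvCell_rowOuter (h w : Nat) (Jf : Nat → List Nat) (hJ : ∀ i, ∀ j ∈ Jf i, j < w)
    (a b : Nat) (_ha : a < h) (I : List Nat) (hI : ∀ i ∈ I, i < h) :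
    ∀ (acc : List (List Int)), pvShape acc h w →
      pvCell (I.foldl (fun m i => (Jf i).foldl (fun m' j => pvSet m' i j 255) m) acc) a b =
        if a ∈ I ∧ b ∈ Jf a then 255 else pvCell acc a b := by
  induction I with
  | nil => intro acc _; simp
  | cons i I ih =>
      intro acc hacc
      have hsh : pvShape ((Jf i).foldl (fun m' j => pvSet m' i j 255) acc) h w :=
        pvShape_foldl h w _ (fun m x hm => pvShape_set2 _ h w _ _ _ hm) _ _ hacc
      rw [List.foldl_cons, ih (fun x hx => hI x (List.mem_cons_of_mem _ hx)) _ hsh]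
      rw [pvCell_rowFold h w i (hI i List.mem_cons_self) (Jf i) (hJ i) a b acc hacc]
      by_cases h1 : a ∈ I <;> by_cases h2 : a = i <;> by_cases h3 : b ∈ Jf a <;>
        simp_all

theorem pvCell_mergeInner (h w i : Nat) (hi : i < h) (c : Nat → Nat → Prop)
    [inst : ∀ x y, Decidable (c x y)] (J : List Nat) (hJ : ∀ j ∈ J, j < w) (a b : Nat) :
    ∀ (acc : List (List Int)), pvShape acc h w →
      pvCell (J.foldl (fun m j => if c i j then pvSet m i j 255 else m) acc) a b =
        if a = i ∧ b ∈ J ∧ c i b then 255 else pvCell acc a b := by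
  induction J with
  | nil => intro acc _; simp
  | cons j J ih =>
      intro acc hacc
      rw [List.foldl_cons]
      by_cases hc : c i j
      · rw [if_pos hc, ih (fun x hx => hJ x (List.mem_cons_of_mem _ hx)) _
          (pvShape_set2 _ h w _ _ _ hacc)]
        rw [pvCell_set acc h w i j a b 255 hacc hi (hJ j List.mem_cons_self)]
        by_cases h1 : a = i <;> by_cases h2 : b ∈ J ∧ c i b <;> by_cases h3 : b = j <;>
          simp_all
      · rw [if_neg hc, ih (fun x hx => hJ x (List.mem_cons_of_mem _ hx)) _ hacc]
        by_cases h1 : a = i <;> by_cases h2 : b ∈ J ∧ c i b <;> by_cases h3 : b = j <;>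
          simp_all

theorem pvCell_mergeOuter (h w : Nat) (c : Nat → Nat → Prop) [inst : ∀ x y, Decidable (c x y)]
    (a b : Nat) (I : List Nat) (hI : ∀ i ∈ I, i < h) (J : List Nat) (hJ : ∀ j ∈ J, j < w) :
    ∀ (acc : List (List Int)), pvShape acc h w →
      pvCell (I.foldl (fun m i =>
          J.foldl (fun m' j => if c i j then pvSet m' i j 255 else m') m) acc) a b =
        if a ∈ I ∧ b ∈ J ∧ c a b then 255 else pvCell acc a b := by
  induction I with
  | nil => intro acc _; simp
  | cons i I ih =>
      intro acc hacc
      have hsh : pvShape (J.foldl (fun m' j => if c i j then pvSet m' i j 255 else m') acc) h w := by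
        refine pvShape_foldl h w _ (fun m x hm => ?_) _ _ hacc
        split
        · exact pvShape_set2 _ h w _ _ _ hm
        · exact hm
      rw [List.foldl_cons, ih (fun x hx => hI x (List.mem_cons_of_mem _ hx)) _ hsh]
      rw [pvCell_mergeInner h w i (hI i List.mem_cons_self) c J hJ a b acc hacc]
      by_cases h1 : a ∈ I <;> by_cases h2 : a = i <;> by_cases h3 : b ∈ J ∧ c a b <;>
        simp_all

theorem pvShape_zeros (h w : Nat) :
    pvShape ((List.range h).map (fun _ => (List.range w).map (fun _ => (0 : Int)))) h w := by
  refine ⟨by simp, ?_⟩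
  intro r hr
  simp only [List.mem_map] at hr
  obtain ⟨x, _, hx⟩ := hr
  simp [← hx]

theorem pvCell_zeros (h w a b : Nat) :
    pvCell ((List.range h).map (fun _ => (List.range w).map (fun _ => (0 : Int)))) a b = 0 := by
  unfold pvCell
  simp only [List.getD_eq_getElem?_getD, List.map_const', List.length_range,
    List.getElem?_replicate]
  by_cases ha : a < h <;> by_cases hb : b < w <;> simp [ha, hb]

theorem pvColScan_eq (edges : List (List Int)) (i : Nat) :
    ∀ (js : List Nat) (acc : List (List Int)),
      pvColScan edges i js acc =
        (js.takeWhile (fun j => !(pvCell edges j i == 255))).foldl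
          (fun m j => pvSet m j i 255) acc := by
  intro js
  induction js with
  | nil => intro acc; rfl
  | cons j rest ih =>
      intro acc
      by_cases hp : pvCell edges j i == 255
      · simp [pvColScan, hp, List.foldl_nil]
      · simp only [pvColScan, List.takeWhile_cons]
        simp [hp, ih]

theorem pvRowScan_eq (edges : List (List Int)) (i : Nat) :
    ∀ (js : List Nat) (acc : List (List Int)),
      pvRowScan edges i js acc =
        (js.takeWhile (fun j => !(pvCell edges i j == 255))).foldl
          (fun m j => pvSet m i j 255) acc := by
  intro js
  induction js with
  | nil => intro acc; rfl
  | cons j rest ih =>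
      intro acc
      by_cases hp : pvCell edges i j == 255
      · simp [pvRowScan, hp, List.foldl_nil]
      · simp only [pvRowScan, List.takeWhile_cons]
        simp [hp, ih]

theorem pvGetD_map_range {α : Type} (f : Nat → α) (n a : Nat) (d : α) (ha : a < n) :
    ((List.range n).map f).getD a d = f a := by
  rw [List.getD_eq_getElem _ _ (by simpa using ha)]
  simp

theorem pvBridgeF (p : Nat → Bool) (n a : Nat) (ha : a < n) :
    (a ∈ (List.range n).takeWhile (fun j => !p j)) ↔
      (a < ((List.range n).find? p).getD n) := by
  rw [List.range_eq_range', pvTW_mem_range' p n 0 a]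
  have h2 := pvFind_range'_lt p n 0 a (by omega)
  simp only [Nat.zero_add] at h2
  rw [h2]
  constructor
  · rintro ⟨-, h1, h3⟩; exact ⟨by omega, fun k _ hk2 => h3 k (by omega) hk2⟩
  · rintro ⟨h1, h3⟩; exact ⟨by omega, by omega, h3⟩

theorem pvBridgeB (p : Nat → Bool) (n a : Nat) (ha : a < n) :
    (a ∈ ((List.range n).map (fun j => n - 1 - j)).takeWhile (fun j => !p j)) ↔
      ((match ((List.range n).map (fun j => n - 1 - j)).find? p with
        | some m => (m : Int) | none => -1) < (a : Int)) := by
  rw [pvTW_mem_rev, pvFind_rev_gt p n a ha]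
  constructor
  · rintro ⟨-, h3⟩; exact h3
  · intro h3; exact ⟨ha, h3⟩

theorem pvTB_pair (edges : List (List Int)) (h' : Nat) :
    ∀ (L : List Nat) (x y : List (List Int)),
      L.foldl (fun p i =>
          (pvColScan edges i (List.range h') p.1,
           pvColScan edges i ((List.range h').map (fun j => h' - 1 - j)) p.2)) (x, y) =
        (L.foldl (fun m i => pvColScan edges i (List.range h') m) x,
         L.foldl (fun m i => pvColScan edges i ((List.range h').map (fun j => h' - 1 - j)) m) y) := by
  intro L
  induction L with
  | nil => intro x y; rfl
  | cons a L ih => intro x y; simp only [List.foldl_cons]; exact ih _ _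

theorem pvLR_pair (edges : List (List Int)) (w' : Nat) :
    ∀ (L : List Nat) (x y : List (List Int)),
      L.foldl (fun p i =>
          (pvRowScan edges i (List.range w') p.1,
           pvRowScan edges i ((List.range w').map (fun j => w' - 1 - j)) p.2)) (x, y) =
        (L.foldl (fun m i => pvRowScan edges i (List.range w') m) x,
         L.foldl (fun m i => pvRowScan edges i ((List.range w').map (fun j => w' - 1 - j)) m) y) := by
  intro L
  induction L with
  | nil => intro x y; rfl
  | cons a L ih => intro x y; simp only [List.foldl_cons]; exact ih _ _

-- named index lists: the portion of each line that A's break scans mark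
def pvTW_t (edges : List (List Int)) (i : Nat) : List Nat :=
  (List.range edges.length).takeWhile (fun j => !(pvCell edges j i == 255))
def pvTW_b (edges : List (List Int)) (i : Nat) : List Nat :=
  ((List.range edges.length).map (fun j => edges.length - 1 - j)).takeWhile
    (fun j => !(pvCell edges j i == 255))
def pvTW_l (edges : List (List Int)) (i : Nat) : List Nat :=
  (List.range (edges.headD []).length).takeWhile (fun j => !(pvCell edges i j == 255))
def pvTW_r (edges : List (List Int)) (i : Nat) : List Nat :=
  ((List.range (edges.headD []).length).map (fun j => (edges.headD []).length - 1 - j)).takeWhile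
    (fun j => !(pvCell edges i j == 255))

theorem pvCell_getElem (m : List (List Int)) (a b : Nat)
    (ha : a < m.length) (hb : b < (m[a]'ha).length) :
    (m[a]'ha)[b]'hb = pvCell m a b := by
  unfold pvCell
  rw [List.getD_eq_getElem _ _ ha, List.getD_eq_getElem _ _ hb]

theorem pv255 (p : Prop) [Decidable p] : ((255 : Int) = if p then 255 else 0) ↔ p := by
  split_ifs with hp
  · simp [hp]
  · simp [hp]

set_option maxHeartbeats 2000000 in
theorem pvMain (edges : List (List Int)) :
    GetPlainEdges edges = GetPlainEdges_alt edges := by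
  have hz := pvShape_zeros edges.length (edges.headD []).length
  unfold GetPlainEdges GetPlainEdges_alt
  simp only []
  rw [pvTB_pair, pvLR_pair]
  simp only [pvColScan_eq, pvRowScan_eq]
  set h := edges.length with hh
  set w := (edges.headD []).length with hw
  set Z : List (List Int) :=
    (List.range h).map (fun _ => (List.range w).map (fun _ => (0 : Int))) with hZ
  set Bot : List (List Int) := List.foldl
      (fun m i => List.foldl (fun m j => pvSet m j i 255) m
        (List.takeWhile (fun j => !(pvCell edges j i == 255))
          (List.map (fun j => h - 1 - j) (List.range h)))) Z (List.range w) with hBotDef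
  set Top : List (List Int) := List.foldl
      (fun m i => List.foldl (fun m j => pvSet m j i 255) m
        (List.takeWhile (fun j => !(pvCell edges j i == 255)) (List.range h))) Z (List.range w)
    with hTopDef
  set Lft : List (List Int) := List.foldl
      (fun m i => List.foldl (fun m j => pvSet m i j 255) m
        (List.takeWhile (fun j => !(pvCell edges i j == 255)) (List.range w))) Z (List.range h)
    with hLftDef
  set Rgt : List (List Int) := List.foldl
      (fun m i => List.foldl (fun m j => pvSet m i j 255) m
        (List.takeWhile (fun j => !(pvCell edges i j == 255))
          (List.map (fun j => w - 1 - j) (List.range w)))) Z (List.range h) with hRgtDef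
  -- index-list bounds for the four takeWhile lists
  have hJt : ∀ i, ∀ j ∈ (List.takeWhile (fun j => !(pvCell edges j i == 255)) (List.range h)),
      j < h := by
    intro i j hj
    have := (List.takeWhile_sublist _).subset hj
    simpa using this
  have hJb : ∀ i, ∀ j ∈ (List.takeWhile (fun j => !(pvCell edges j i == 255))
      (List.map (fun j => h - 1 - j) (List.range h))), j < h := by
    intro i j hj
    exact pvMem_Lrev h j ((List.takeWhile_sublist _).subset hj)
  have hJl : ∀ i, ∀ j ∈ (List.takeWhile (fun j => !(pvCell edges i j == 255)) (List.range w)),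
      j < w := by
    intro i j hj
    have := (List.takeWhile_sublist _).subset hj
    simpa using this
  have hJr : ∀ i, ∀ j ∈ (List.takeWhile (fun j => !(pvCell edges i j == 255))
      (List.map (fun j => w - 1 - j) (List.range w))), j < w := by
    intro i j hj
    exact pvMem_Lrev w j ((List.takeWhile_sublist _).subset hj)
  -- shapes
  have hShBot : pvShape Bot h w := by
    rw [hBotDef]
    exact pvShape_foldl h w _ (fun m x hm =>
      pvShape_foldl h w _ (fun m' y hm' => pvShape_set2 _ h w _ _ _ hm') _ _ hm) _ _ hz
  have hShTop : pvShape Top h w := by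
    rw [hTopDef]
    exact pvShape_foldl h w _ (fun m x hm =>
      pvShape_foldl h w _ (fun m' y hm' => pvShape_set2 _ h w _ _ _ hm') _ _ hm) _ _ hz
  have hShLft : pvShape Lft h w := by
    rw [hLftDef]
    exact pvShape_foldl h w _ (fun m x hm =>
      pvShape_foldl h w _ (fun m' y hm' => pvShape_set2 _ h w _ _ _ hm') _ _ hm) _ _ hz
  have hShRgt : pvShape Rgt h w := by
    rw [hRgtDef]
    exact pvShape_foldl h w _ (fun m x hm =>
      pvShape_foldl h w _ (fun m' y hm' => pvShape_set2 _ h w _ _ _ hm') _ _ hm) _ _ hz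
  -- cell values of the four mark matrices
  have hcBot : ∀ a b, b < w → pvCell Bot a b =
      if a ∈ (List.takeWhile (fun j => !(pvCell edges j b == 255))
        (List.map (fun j => h - 1 - j) (List.range h))) then 255 else 0 := by
    intro a b hb
    rw [hBotDef, pvCell_colOuter h w _ hJb a b hb (List.range w) (by simp) Z hz,
      hZ, pvCell_zeros]
    simp [List.mem_range, hb]
  have hcTop : ∀ a b, b < w → pvCell Top a b =
      if a ∈ (List.takeWhile (fun j => !(pvCell edges j b == 255)) (List.range h))
      then 255 else 0 := by
    intro a b hb
    rw [hTopDef, pvCell_colOuter h w _ hJt a b hb (List.range w) (by simp) Z hz,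
      hZ, pvCell_zeros]
    simp [List.mem_range, hb]
  have hcLft : ∀ a b, a < h → pvCell Lft a b =
      if b ∈ (List.takeWhile (fun j => !(pvCell edges a j == 255)) (List.range w))
      then 255 else 0 := by
    intro a b ha
    rw [hLftDef, pvCell_rowOuter h w _ hJl a b ha (List.range h) (by simp) Z hz,
      hZ, pvCell_zeros]
    simp [List.mem_range, ha]
  have hcRgt : ∀ a b, a < h → pvCell Rgt a b =
      if b ∈ (List.takeWhile (fun j => !(pvCell edges a j == 255))
        (List.map (fun j => w - 1 - j) (List.range w))) then 255 else 0 := by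
    intro a b ha
    rw [hRgtDef, pvCell_rowOuter h w _ hJr a b ha (List.range h) (by simp) Z hz,
      hZ, pvCell_zeros]
    simp [List.mem_range, ha]
  -- shape of the merged result
  have hShM : pvShape (List.foldl
      (fun acc i => List.foldl
        (fun acc2 j =>
          if 255 ∈ [pvCell Bot i j, pvCell Top i j, pvCell Lft i j, pvCell Rgt i j]
          then pvSet acc2 i j 255 else acc2) acc (List.range w)) Bot (List.range h)) h w := by
    refine pvShape_foldl h w _ (fun m x hm => ?_) _ _ hShBot
    refine pvShape_foldl h w _ (fun m' y hm' => ?_) _ _ hm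
    split
    · exact pvShape_set2 _ h w _ _ _ hm'
    · exact hm'
  apply List.ext_getElem
  · rw [hShM.1]; simp
  intro a ha1 ha2
  apply List.ext_getElem
  · rw [hShM.2 _ (List.getElem_mem ha1)]
    simp
  intro b hb1 hb2
  have ha : a < h := by rw [← hShM.1]; exact ha1
  have hb : b < w := by rw [← hShM.2 _ (List.getElem_mem ha1)]; exact hb1
  rw [pvCell_getElem _ a b ha1 hb1]
  rw [pvCell_mergeOuter h w
    (fun i j => (255 : Int) ∈ [pvCell Bot i j, pvCell Top i j, pvCell Lft i j, pvCell Rgt i j])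
    a b (List.range h) (by simp) (List.range w) (by simp) Bot hShBot]
  simp only [List.getElem_map, List.getElem_range]
  rw [pvGetD_map_range _ h a _ ha, pvGetD_map_range _ h a _ ha,
    pvGetD_map_range _ w b _ hb, pvGetD_map_range _ w b _ hb]
  rw [hcBot a b hb, hcTop a b hb, hcLft a b ha, hcRgt a b ha]
  simp only [List.mem_range, List.mem_cons, List.not_mem_nil, or_false, pv255, ha, hb,
    true_and, gt_iff_lt]
  have e1 := pvBridgeB (fun k => pvCell edges k b == 255) h a ha
  have e2 := pvBridgeF (fun k => pvCell edges k b == 255) h a ha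
  have e3 := pvBridgeF (fun k => pvCell edges a k == 255) w b hb
  have e4 := pvBridgeB (fun k => pvCell edges a k == 255) w b hb
  simp only [e1, e2, e3, e4]
  split_ifs <;> first | rfl | tauto

-- ===== VERDICT (by name: the statement is the Claim_ definition above) =====
theorem GetPlainEdges_spec : Claim_equal_GetPlainEdges := by
  intro edges _ _
  unfold Spec_GetPlainEdges
  exact pvMain edges
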